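-- pv_equiv track=rewrite | github.com/EnesSakalliUniWien/BranchArchitect | brancharchitect/co_clustering_frequencies.py | filter_minimal_splits
-- ===== SOURCE A (Python) =====
-- from typing import List, Dict, Set, Tuple, Any, Optional
--
-- def filter_minimal_splits(splits: List[Set[int]]) -> List[Set[int]]:
--     """
--     Filters the list of splits to only include minimal unique splits,
--     i.e., splits that are not subsets of any other split in the list.
--
--     Args:
--     - splits (List[Set[int]]): List of splits represented as sets of taxon indices.
--
--     Returns:
--     - List[Set[int]]: Filtered list of minimal unique splits.
--     """
--     filtered_splits = []
--     for split in splits: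
--         if not any(
--             split < other_split for other_split in splits if split != other_split
--         ):
--             filtered_splits.append(split)
--     return filtered_splits
-- ===== SOURCE B (Python) =====
-- def filter_minimal_splits(splits):
--     # Sort indices by set size descending (stable); sweep once, keeping a split
--     # unless it is a proper subset of an already-kept (larger) survivor; then
--     # restore original input order.
--     order = sorted(range(len(splits)), key=lambda i: -len(splits[i]))
--     survivors = []
--     for i in order:
--         s = splits[i]
--         if not any(s < t for _, t in survivors):
--             survivors.append((i, s))
--     survivors.sort(key=lambda p: p[0])
--     return [s for _, s in survivors]
-- ===== Notes on version B (the rewrite author's own statement) =====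
-- stated objective: alternative
-- what changed: Replaces A's all-pairs proper-subset scan with a size-descending sweep that compares each split only against the already-kept survivors (correct by transitivity of proper containment), then restores the original input order by sorting kept items by their original index.
import Mathlib
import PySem

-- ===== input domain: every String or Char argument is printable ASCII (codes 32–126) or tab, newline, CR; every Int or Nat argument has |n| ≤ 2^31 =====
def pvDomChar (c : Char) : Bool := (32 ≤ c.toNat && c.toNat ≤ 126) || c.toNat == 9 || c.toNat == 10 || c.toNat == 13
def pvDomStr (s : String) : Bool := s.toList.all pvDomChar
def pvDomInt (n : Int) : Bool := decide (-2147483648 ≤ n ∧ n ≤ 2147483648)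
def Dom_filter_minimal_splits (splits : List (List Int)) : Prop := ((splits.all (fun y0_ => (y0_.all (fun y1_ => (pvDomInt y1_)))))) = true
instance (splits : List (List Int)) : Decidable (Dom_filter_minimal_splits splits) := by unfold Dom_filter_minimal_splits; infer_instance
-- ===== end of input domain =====

-- B replaces A's quadratic all-pairs subset test by a size-descending sweep that
-- compares each split only against the already-kept survivors (alternative algorithm,
-- same return value; no mutation of the input).

-- ===== PORT A =====
-- a.all contains = Python's set subset test (order-insensitive; shared by both ports)
def pvSubA (a b : List Int) : Bool := a.all (fun x => b.contains x)

def filter_minimal_splits (splits : List (List Int)) : List (List Int) :=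
  splits.foldl
    (fun acc split =>
      if splits.any (fun other =>
            -- 'if split != other_split' (set inequality) and 'split < other_split' (proper subset)
            (!(pvSubA split other && pvSubA other split)) &&
            (pvSubA split other && !(pvSubA other split)))
      then acc
      else acc ++ [split]) []

-- ===== PORT B =====
def filter_minimal_splits_alt (splits : List (List Int)) : List (List Int) :=
  -- order = sorted(range(len(splits)), key=lambda i: -len(splits[i]))
  let order := PySem.List.sorted (List.range splits.length)
      (fun i => -(((splits.getD i []).length : Int))) false
  -- sweep: keep unless proper subset of an already-kept survivor
  let survivors := order.foldl
    (fun acc i =>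
      let s := splits.getD i []
      if acc.any (fun p => pvSubA s p.2 && !(pvSubA p.2 s)) then acc
      else acc ++ [(i, s)]) ([] : List (Nat × List Int))
  -- survivors.sort(key=lambda p: p[0]); return [s for _, s in survivors]
  (PySem.List.sorted survivors (fun p => p.1) false).map Prod.snd

-- ===== PRECONDITION & SPEC =====
-- Pre_: the set-representation invariant — A's parameter is a list of Python SETS,
-- so each inner list holds distinct elements; Pre_ excludes no input a caller of A can form.
def Pre_filter_minimal_splits (splits : List (List Int)) : Prop :=
  ∀ l ∈ splits, l.Nodup
instance (splits : List (List Int)) : Decidable (Pre_filter_minimal_splits splits) := by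
  unfold Pre_filter_minimal_splits; infer_instance

def pvWitness_filter_minimal_splits : List (List Int) := [[1, 2], [1], [3]]

def Spec_filter_minimal_splits (splits : List (List Int)) (out : List (List Int)) : Prop :=
  out = filter_minimal_splits_alt splits
instance (splits : List (List Int)) (out : List (List Int)) : Decidable (Spec_filter_minimal_splits splits out) := by
  unfold Spec_filter_minimal_splits; infer_instance

-- ===== CLAIM (what is proved, stated in full; the proofs are below) =====
def Claim_equal_filter_minimal_splits : Prop :=
  ∀ (splits : List (List Int)), Dom_filter_minimal_splits splits →
    Pre_filter_minimal_splits splits →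
    Spec_filter_minimal_splits splits (filter_minimal_splits splits)

-- ===== LEMMAS AND PROOFS =====

-- Set-level subset / proper-subset predicates (membership semantics)
def PvSub (a b : List Int) : Prop := ∀ x ∈ a, x ∈ b
def PvSsub (a b : List Int) : Prop := PvSub a b ∧ ¬ PvSub b a
def PvKeep (splits : List (List Int)) (s : List Int) : Prop := ∀ t ∈ splits, ¬ PvSsub s t

theorem pvSubA_iff (a b : List Int) : pvSubA a b = true ↔ PvSub a b := by
  simp [pvSubA, PvSub]

theorem pvSsub_bool_iff (a b : List Int) :
    (pvSubA a b && !(pvSubA b a)) = true ↔ PvSsub a b := by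
  simp [PvSsub, pvSubA, PvSub]

theorem pvSsub_trans {a b c : List Int} (h1 : PvSsub a b) (h2 : PvSsub b c) : PvSsub a c := by
  refine ⟨fun x hx => h2.1 x (h1.1 x hx), fun hca => h2.2 (fun x hx => h1.1 x (hca x hx))⟩

theorem pvSsub_length_lt {a b : List Int} (ha : a.Nodup) (hb : b.Nodup)
    (h : PvSsub a b) : a.length < b.length := by
  have hsub : a.toFinset ⊆ b.toFinset := by
    intro x hx
    simp only [List.mem_toFinset] at *
    exact h.1 x hx
  have hne : a.toFinset ≠ b.toFinset := by
    intro he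
    apply h.2
    intro x hx
    have : x ∈ a.toFinset := he ▸ (List.mem_toFinset.mpr hx)
    exact List.mem_toFinset.mp this
  have := Finset.card_lt_card (lt_of_le_of_ne hsub hne)
  rwa [List.toFinset_card_of_nodup ha, List.toFinset_card_of_nodup hb] at this

-- A's kept-predicate, as a Boolean
def pvKeepB (splits : List (List Int)) (s : List Int) : Bool :=
  !(splits.any (fun o => pvSubA s o && !(pvSubA o s)))

theorem pvKeepB_iff (splits : List (List Int)) (s : List Int) :
    pvKeepB splits s = true ↔ PvKeep splits s := by
  simp [pvKeepB, PvKeep, PvSsub, pvSubA_iff]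

-- A's loop is a filter
theorem foldl_if_filter (p : List Int → Bool) (xs : List (List Int)) (acc : List (List Int)) :
    xs.foldl (fun a x => if p x then a else a ++ [x]) acc = acc ++ xs.filter (fun x => !p x) := by
  induction xs generalizing acc with
  | nil => simp
  | cons x t ih =>
    by_cases h : p x = true <;> simp [List.foldl_cons, h, ih]

theorem A_eq_filter (splits : List (List Int)) :
    filter_minimal_splits splits = splits.filter (fun s => pvKeepB splits s) := by
  unfold filter_minimal_splits
  rw [foldl_if_filter]
  rw [List.nil_append]
  apply List.filter_congr
  intro s _
  unfold pvKeepB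
  congr 2
  funext o
  cases pvSubA s o <;> cases pvSubA o s <;> rfl

-- index view of splits
theorem getD_mem {L : List (List Int)} {j : Nat} (h : j < L.length) :
    L.getD j [] ∈ L := by
  rw [List.getD_eq_getElem?_getD, List.getElem?_eq_getElem h]
  exact List.getElem_mem h

-- ===== the sweep invariant =====

def pvStep (L : List (List Int)) (acc : List (Nat × List Int)) (i : Nat) :
    List (Nat × List Int) :=
  let s := L.getD i []
  if acc.any (fun p => pvSubA s p.2 && !(pvSubA p.2 s)) then acc
  else acc ++ [(i, s)]

theorem sweep_inv (L : List (List Int)) (hnd : ∀ l ∈ L, l.Nodup)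
    (ord : List Nat)
    (hperm : ord.Perm (List.range L.length))
    (hpair : ord.Pairwise (fun a b =>
      (-(((L.getD a []).length : Int))) ≤ (-(((L.getD b []).length : Int))))) :
    ∀ (rest pre : List Nat) (acc : List (Nat × List Int)),
      ord = pre ++ rest →
      (∀ q ∈ acc, q.1 ∈ pre ∧ q.2 = L.getD q.1 []) →
      (∀ q ∈ acc, PvKeep L q.2) →
      (∀ j ∈ pre, ((j, L.getD j []) ∈ acc) ∨ ∃ q ∈ acc, PvSsub (L.getD j []) q.2) →
      (acc.map Prod.fst).Nodup →
      (∀ q ∈ rest.foldl (pvStep L) acc, q.1 ∈ ord ∧ q.2 = L.getD q.1 []) ∧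
      (∀ q ∈ rest.foldl (pvStep L) acc, PvKeep L q.2) ∧
      (∀ j ∈ ord, ((j, L.getD j []) ∈ rest.foldl (pvStep L) acc) ∨
        ∃ q ∈ rest.foldl (pvStep L) acc, PvSsub (L.getD j []) q.2) ∧
      ((rest.foldl (pvStep L) acc).map Prod.fst).Nodup := by
  have hordnd : ord.Nodup := (hperm.nodup_iff).mpr (List.nodup_range)
  intro rest
  induction rest with
  | nil =>
    intro pre acc hord h1 h2 h3 h4
    rw [List.append_nil] at hord
    subst hord
    exact ⟨h1, h2, h3, h4⟩
  | cons i rest ih =>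
    intro pre acc hord h1 h2 h3 h4
    have hilt : i < L.length := by
      have : i ∈ List.range L.length := hperm.mem_iff.mp (by rw [hord]; simp)
      simpa using this
    have hiS : L.getD i [] ∈ L := getD_mem hilt
    have hinotpre : i ∉ pre := by
      intro hip
      rw [hord] at hordnd
      rcases List.nodup_append.mp hordnd with ⟨-, -, hdisj⟩
      exact hdisj i hip i (List.mem_cons_self ..) rfl
    simp only [List.foldl_cons]
    by_cases hc : acc.any
        (fun p => pvSubA (L.getD i []) p.2 && !(pvSubA p.2 (L.getD i []))) = true
    · -- rejected: some survivor strictly contains L.getD i []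
      have hstep : pvStep L acc i = acc := by
        unfold pvStep
        rw [if_pos hc]
      rw [hstep]
      refine ih (pre ++ [i]) acc (by rw [hord]; simp) ?_ h2 ?_ h4
      · intro q hq
        exact ⟨List.mem_append_left _ (h1 q hq).1, (h1 q hq).2⟩
      · intro j hj
        rcases List.mem_append.mp hj with hj | hj
        · exact h3 j hj
        · have hji : j = i := by simpa using hj
          subst hji
          rcases List.any_eq_true.mp hc with ⟨q, hq, hb⟩
          exact Or.inr ⟨q, hq, (pvSsub_bool_iff _ _).mp hb⟩
    · -- kept: no survivor strictly contains it; show it is globally minimal-kept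
      have hstep : pvStep L acc i = acc ++ [(i, L.getD i [])] := by
        unfold pvStep
        rw [if_neg hc]
      rw [hstep]
      have hkeep : PvKeep L (L.getD i []) := by
        intro t ht hss
        rcases List.mem_iff_getElem.mp ht with ⟨j, hjlt, hjt⟩
        have hjS : L.getD j [] = t := by rw [List.getD_eq_getElem _ _ hjlt, hjt]
        have hlen : (L.getD i []).length < t.length :=
          pvSsub_length_lt (hnd _ hiS) (hnd t ht) hss
        have hjpre : j ∈ pre := by
          have hjord : j ∈ ord := hperm.mem_iff.mpr (by simpa using hjlt)
          rw [hord] at hjord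
          rcases List.mem_append.mp hjord with h | h
          · exact h
          rcases List.mem_cons.mp h with h | h
          · exfalso
            subst h
            rw [hjS] at hlen
            omega
          · exfalso
            have hp := (List.pairwise_append.mp (hord ▸ hpair)).2.1
            have := (List.pairwise_cons.mp hp).1 j h
            rw [hjS] at this
            omega
        rcases h3 j hjpre with hin | ⟨q, hq, hqss⟩
        · apply hc
          refine List.any_eq_true.mpr ⟨(j, L.getD j []), hin, ?_⟩
          apply (pvSsub_bool_iff _ _).mpr
          rw [hjS]
          exact hss
        · apply hc
          refine List.any_eq_true.mpr ⟨q, hq, ?_⟩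
          apply (pvSsub_bool_iff _ _).mpr
          exact pvSsub_trans (hjS ▸ hss) hqss
      refine ih (pre ++ [i]) _ (by rw [hord]; simp) ?_ ?_ ?_ ?_
      · intro q hq
        rcases List.mem_append.mp hq with hq | hq
        · exact ⟨List.mem_append_left _ (h1 q hq).1, (h1 q hq).2⟩
        · have : q = (i, L.getD i []) := by simpa using hq
          subst this
          exact ⟨by simp, rfl⟩
      · intro q hq
        rcases List.mem_append.mp hq with hq | hq
        · exact h2 q hq
        · have : q = (i, L.getD i []) := by simpa using hq
          subst this
          exact hkeep
      · intro j hj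
        rcases List.mem_append.mp hj with hj | hj
        · rcases h3 j hj with h | ⟨q, hq, hqss⟩
          · exact Or.inl (List.mem_append_left _ h)
          · exact Or.inr ⟨q, List.mem_append_left _ hq, hqss⟩
        · have hji : j = i := by simpa using hj
          subst hji
          exact Or.inl (by simp)
      · rw [List.map_append]
        simp only [List.map_cons, List.map_nil]
        apply List.Nodup.append h4 (List.nodup_singleton _)
        intro a ha hb
        have hai : a = i := by simpa using hb
        subst hai
        rcases List.mem_map.mp ha with ⟨q, hq, hq1⟩
        exact hinotpre (hq1 ▸ (h1 q hq).1)

-- ===== putting B together =====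

theorem range_filter_map (L : List (List Int)) (P : List Int → Bool) :
    (((List.range L.length).filter (fun j => P (L.getD j []))).map (fun j => L.getD j [])) =
      L.filter P := by
  induction L with
  | nil => simp
  | cons x t ih =>
    rw [List.length_cons, List.range_succ_eq_map]
    simp only [List.filter_cons, List.getD_cons_zero, List.filter_map]
    have ih' : List.map (fun j => t[j]?.getD []) (List.filter (fun j => P (t[j]?.getD [])) (List.range t.length)) = List.filter P t := by
      simpa [List.getD_eq_getElem?_getD] using ih
    by_cases h : P x = true <;> simp [h, Function.comp_def, ih']

theorem B_eq_filter (L : List (List Int)) (hnd : ∀ l ∈ L, l.Nodup) :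
    filter_minimal_splits_alt L = L.filter (fun s => pvKeepB L s) := by
  unfold filter_minimal_splits_alt
  set ord := PySem.List.sorted (List.range L.length)
      (fun i => -(((L.getD i []).length : Int))) false with hord
  have hperm : ord.Perm (List.range L.length) := by
    rw [hord]; exact PySem.List.sorted_perm _ _ _
  have hpair : ord.Pairwise
      (fun a b => (-(((L.getD a []).length : Int))) ≤ (-(((L.getD b []).length : Int)))) := by
    rw [hord]; exact PySem.List.sorted_pairwise _ _
  obtain ⟨F1, F2, F3, F4⟩ :=
    sweep_inv L hnd ord hperm hpair ord [] []
      (List.nil_append ord).symm (by simp) (by simp) (by simp) (by simp)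
  set surv := ord.foldl (pvStep L) [] with hsurv
  show (PySem.List.sorted surv (fun p => p.1) false).map Prod.snd =
    L.filter (fun s => pvKeepB L s)
  set tgt := ((List.range L.length).filter (fun j => pvKeepB L (L.getD j []))).map
      (fun j => (j, L.getD j [])) with htgt
  have hlt_of_mem_ord : ∀ {j : Nat}, j ∈ ord → j < L.length := by
    intro j hj
    simpa using hperm.mem_iff.mp hj
  have hmem : ∀ q, q ∈ surv ↔ q ∈ tgt := by
    intro q
    constructor
    · intro hq
      obtain ⟨hqo, hq2⟩ := F1 q hq
      have hqlt : q.1 < L.length := hlt_of_mem_ord hqo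
      have hqk : pvKeepB L q.2 = true := (pvKeepB_iff _ _).mpr (F2 q hq)
      rw [htgt]
      refine List.mem_map.mpr ⟨q.1, List.mem_filter.mpr ⟨by simpa using hqlt, by rw [← hq2]; exact hqk⟩, ?_⟩
      rw [← hq2]
    · intro hq
      rw [htgt] at hq
      rcases List.mem_map.mp hq with ⟨j, hjf, hjq⟩
      rcases List.mem_filter.mp hjf with ⟨hjr, hjk⟩
      have hjlt : j < L.length := by simpa using hjr
      have hjkeep : PvKeep L (L.getD j []) := (pvKeepB_iff _ _).mp hjk
      have hjord : j ∈ ord := hperm.mem_iff.mpr hjr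
      rcases F3 j hjord with h | ⟨p, hp, hpss⟩
      · rw [← hjq]; exact h
      · exfalso
        have hplt : p.1 < L.length := hlt_of_mem_ord (F1 p hp).1
        have : p.2 ∈ L := by rw [(F1 p hp).2]; exact getD_mem hplt
        exact hjkeep p.2 this hpss
  have hnds : surv.Nodup := F4.of_map
  have hndt : tgt.Nodup := by
    rw [htgt]
    apply List.Nodup.map
    · intro a b hab
      exact congrArg Prod.fst hab
    · exact List.Nodup.filter _ List.nodup_range
  have hperm2 : tgt.Perm surv := by
    rw [List.perm_ext_iff_of_nodup hndt hnds]
    intro q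
    rw [hmem q]
  have hpairt : tgt.Pairwise (fun p q => p.1 < q.1) := by
    rw [htgt]
    rw [List.pairwise_map]
    exact (List.pairwise_lt_range.filter _)
  have hs := PySem.List.sorted_eq_of_perm_of_pairwise_lt surv tgt (fun p : Nat × List Int => p.1) hperm2 hpairt
  rw [hs]
  rw [htgt, List.map_map]
  have : (Prod.snd ∘ fun j => (j, L.getD j [])) = (fun j => L.getD j []) := rfl
  rw [this]
  exact range_filter_map L (fun s => pvKeepB L s)

-- ===== VERDICT (by name: the statement is the Claim_ definition above) =====
theorem filter_minimal_splits_spec : Claim_equal_filter_minimal_splits := by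
  intro splits _ hpre
  unfold Spec_filter_minimal_splits
  rw [A_eq_filter, B_eq_filter splits hpre]
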